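-- pv_equiv track=rewrite | github.com/GabrielIslas/Third-Quarter | ProgrammingParadigms/EjerciciosVariosOOP/Ejercicio2.py | areSymbolsRepeating
-- ===== SOURCE A (Python) =====
-- def areSymbolsRepeating(tokens):
--     symbolRepeat = 0
--     previousSymbol = None
--     for token in tokens:
--         tokenCanRepeat = token ==  "M" or token == "C" or token == "X" or token == "I"
--         if previousSymbol != token:
--             previousSymbol = token
--             if tokenCanRepeat:
--                 symbolRepeat = 1
--             else:
--                 symbolRepeat = 3
--         elif previousSymbol == token:
--             symbolRepeat += 1
--         if symbolRepeat == 4: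
--             return True
--     return False
-- ===== SOURCE B (Python) =====
-- def areSymbolsRepeating(tokens):
--     i, n = 0, len(tokens)
--     while i < n:
--         j = i + 1
--         while j < n and tokens[j] == tokens[i]:
--             j += 1
--         need = 4 if tokens[i] in ("M", "C", "X", "I") else 2
--         if j - i >= need:
--             return True
--         i = j
--     return False
-- ===== Notes on version B (the rewrite author's own statement) =====
-- stated objective: alternative
-- what changed: B splits the token list into maximal runs of consecutive equal tokens and compares each run length against its threshold (4 for M/C/X/I, else 2), instead of A's incremental counter that is reset/seeded per token and tested for == 4.
import Mathlib
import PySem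

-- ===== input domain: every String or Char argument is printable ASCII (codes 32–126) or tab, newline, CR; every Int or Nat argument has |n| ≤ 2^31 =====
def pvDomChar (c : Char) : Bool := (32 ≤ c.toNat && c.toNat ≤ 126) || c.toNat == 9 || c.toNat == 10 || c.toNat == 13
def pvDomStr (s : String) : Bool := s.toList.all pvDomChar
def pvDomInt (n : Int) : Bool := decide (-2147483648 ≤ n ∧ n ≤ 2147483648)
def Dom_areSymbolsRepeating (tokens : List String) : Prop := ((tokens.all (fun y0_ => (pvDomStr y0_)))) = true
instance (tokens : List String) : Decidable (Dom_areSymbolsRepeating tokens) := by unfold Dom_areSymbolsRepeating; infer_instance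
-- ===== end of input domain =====

-- B replaces A's per-token reset counter with a scan over maximal runs of equal tokens (alternative decomposition, same behaviour).


-- ===== PORT A =====
-- loop over tokens with state (symbolRepeat, previousSymbol); early `return True` = result true
def areSymbolsRepeatingGo (rep : Int) (prev : Option String) : List String → Bool
  | [] => false
  | token :: ts =>
    let tokenCanRepeat := token == "M" || token == "C" || token == "X" || token == "I"
    let st := if prev ≠ some token
                then ((if tokenCanRepeat then (1 : Int) else 3), some token)
                else (rep + 1, prev)
    if st.1 == 4 then true else areSymbolsRepeatingGo st.1 st.2 ts

def areSymbolsRepeating (tokens : List String) : Bool :=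
  areSymbolsRepeatingGo 0 none tokens

-- ===== PORT B =====
-- outer while: one step per maximal run (head = tokens[i]); inner while counting equal tokens = takeWhile, advancing i to j = dropWhile
def areSymbolsRepeating_alt : List String → Bool
  | [] => false
  | head :: ts =>
    let run := 1 + (ts.takeWhile (· == head)).length
    let need := if head == "M" || head == "C" || head == "X" || head == "I" then 4 else 2
    if need ≤ run then true
    else areSymbolsRepeating_alt (ts.dropWhile (· == head))
termination_by l => l.length
decreasing_by
  exact Nat.lt_succ_of_le (List.length_dropWhile_le _ _)

-- ===== PRECONDITION & SPEC =====
def Spec_areSymbolsRepeating (tokens : List String) (out : Bool) : Prop := out = areSymbolsRepeating_alt tokens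
instance (tokens : List String) (out : Bool) : Decidable (Spec_areSymbolsRepeating tokens out) := by unfold Spec_areSymbolsRepeating; infer_instance

-- ===== CLAIM (what is proved, stated in full; the proofs are below) =====
def Claim_equal_areSymbolsRepeating : Prop := ∀ (tokens : List String), Dom_areSymbolsRepeating tokens → Spec_areSymbolsRepeating tokens (areSymbolsRepeating tokens)

-- ===== LEMMAS AND PROOFS =====

-- While the current run of symbol t continues, A's counter only increments; it fires iff the
-- remaining run length pushes the count to 4; otherwise A stands at the head of a fresh run,
-- which is exactly B's recursion with the current run dropped.
lemma goRun (l : List String) : ∀ (t : String) (rep : Int), 1 ≤ rep → rep ≤ 3 →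
    areSymbolsRepeatingGo rep (some t) l =
      if (4 : Int) ≤ (l.takeWhile (· == t)).length + rep then true
      else areSymbolsRepeating_alt (l.dropWhile (· == t)) := by
  induction l with
  | nil =>
    intro t rep h1 h3
    rw [if_neg (by simpa using by omega)]
    simp [areSymbolsRepeatingGo, areSymbolsRepeating_alt]
  | cons u us ih =>
    intro t rep h1 h3
    by_cases hu : u = t
    · subst hu
      simp only [areSymbolsRepeatingGo, ne_eq, not_true_eq_false, if_false,
        List.takeWhile_cons, List.dropWhile_cons, beq_self_eq_true, if_true, List.length_cons]
      by_cases h4 : rep = 3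
      · subst h4
        have hc : (4 : Int) ≤ (((us.takeWhile (· == u)).length + 1 : Nat) : Int) + 3 := by
          push_cast; omega
        rw [if_pos (by decide : (((3:Int) + 1 == 4) = true)), if_pos hc]
      · have hne : ¬ ((rep + 1 == (4:Int)) = true) := by simp; omega
        rw [if_neg hne, ih u (rep + 1) (by omega) (by omega)]
        have heq : ((4:Int) ≤ ((us.takeWhile (· == u)).length : Int) + (rep + 1)) ↔
            ((4:Int) ≤ (((us.takeWhile (· == u)).length + 1 : Nat) : Int) + rep) := by
          push_cast; omega
        split_ifs with hA hB hB
        · rfl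
        · exact absurd (heq.mp hA) hB
        · exact absurd (heq.mpr hB) hA
        · rfl
    · have hbe : (u == t) = false := beq_eq_false_iff_ne.mpr hu
      simp only [areSymbolsRepeatingGo, ne_eq, Option.some.injEq, List.takeWhile_cons,
        List.dropWhile_cons, hbe, Bool.false_eq_true, if_false, List.length_nil,
        Nat.cast_zero, zero_add]
      rw [if_pos (fun h => hu h.symm)]
      have hout : ¬ ((4:Int) ≤ rep) := by omega
      rw [if_neg hout]
      by_cases hr : (u == "M" || u == "C" || u == "X" || u == "I") = true
      · simp only [hr, if_true]
        norm_num
        rw [ih u 1 (by omega) (by omega)]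
        simp only [areSymbolsRepeating_alt, hr, if_true]
        have heq : ((4:Int) ≤ ((us.takeWhile (· == u)).length : Int) + 1) ↔
            (4 ≤ 1 + (us.takeWhile (· == u)).length) := by omega
        split_ifs with hA hB hB
        · rfl
        · exact absurd (heq.mp hA) hB
        · exact absurd (heq.mpr hB) hA
        · rfl
      · simp only [hr, if_false, Bool.false_eq_true]
        norm_num
        rw [ih u 3 (by omega) (by omega)]
        simp only [areSymbolsRepeating_alt, hr, if_false, Bool.false_eq_true]
        have heq : ((4:Int) ≤ ((us.takeWhile (· == u)).length : Int) + 3) ↔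
            (2 ≤ 1 + (us.takeWhile (· == u)).length) := by omega
        split_ifs with hA hB hB
        · rfl
        · exact absurd (heq.mp hA) hB
        · exact absurd (heq.mpr hB) hA
        · rfl

-- ===== VERDICT (by name: the statement is the Claim_ definition above) =====
theorem areSymbolsRepeating_spec : Claim_equal_areSymbolsRepeating := by
  intro tokens _
  unfold Spec_areSymbolsRepeating areSymbolsRepeating
  cases tokens with
  | nil => simp [areSymbolsRepeatingGo, areSymbolsRepeating_alt]
  | cons t ts =>
    simp only [areSymbolsRepeatingGo, ne_eq]
    rw [if_pos (show ¬ (none : Option String) = some t by simp)]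
    by_cases hr : (t == "M" || t == "C" || t == "X" || t == "I") = true
    · simp only [hr, if_true]
      norm_num
      rw [goRun ts t 1 (by omega) (by omega)]
      simp only [areSymbolsRepeating_alt, hr, if_true]
      have heq : ((4:Int) ≤ ((ts.takeWhile (· == t)).length : Int) + 1) ↔
          (4 ≤ 1 + (ts.takeWhile (· == t)).length) := by omega
      split_ifs with hA hB hB
      · rfl
      · exact absurd (heq.mp hA) hB
      · exact absurd (heq.mpr hB) hA
      · rfl
    · simp only [hr, if_false, Bool.false_eq_true]
      norm_num
      rw [goRun ts t 3 (by omega) (by omega)]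
      simp only [areSymbolsRepeating_alt, hr, if_false, Bool.false_eq_true]
      have heq : ((4:Int) ≤ ((ts.takeWhile (· == t)).length : Int) + 3) ↔
          (2 ≤ 1 + (ts.takeWhile (· == t)).length) := by omega
      split_ifs with hA hB hB
      · rfl
      · exact absurd (heq.mp hA) hB
      · exact absurd (heq.mpr hB) hA
      · rfl
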